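-- pv_equiv track=rewrite | github.com/sourovdeb/email_automation | researcher.py | _pick_contact_email
-- ===== SOURCE A (Python) =====
-- def _pick_contact_email(emails, company_name):
--     """Score and rank emails: prefer hr/recrutement/contact, avoid generic."""
--     if not emails:
--         return None
--     priority_keywords = ["recrutement", "rh", "hr", "contact", "emploi", "candidature"]
--     for kw in priority_keywords:
--         for e in emails:
--             if kw in e:
--                 return e
--     return emails[0]
-- ===== SOURCE B (Python) =====
-- def _pick_contact_email(emails, company_name):
--     """Score each email by the index of the first priority keyword it contains,
--     then return the first email attaining the minimum score."""
--     if not emails: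
--         return None
--     priority_keywords = ["recrutement", "rh", "hr", "contact", "emploi", "candidature"]
--
--     def score(e):
--         return next((i for i, kw in enumerate(priority_keywords) if kw in e),
--                     len(priority_keywords))
--
--     best, best_s = emails[0], score(emails[0])
--     for e in emails[1:]:
--         s = score(e)
--         if s < best_s:
--             best, best_s = e, s
--     return best
-- ===== Notes on version B (the rewrite author's own statement) =====
-- stated objective: alternative
-- what changed: Replaces the keyword-outer nested scan with early return by a single argmin pass over emails using a per-email priority score (index of first matching keyword, len(keywords) if none), first minimum wins.
import Mathlib
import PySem

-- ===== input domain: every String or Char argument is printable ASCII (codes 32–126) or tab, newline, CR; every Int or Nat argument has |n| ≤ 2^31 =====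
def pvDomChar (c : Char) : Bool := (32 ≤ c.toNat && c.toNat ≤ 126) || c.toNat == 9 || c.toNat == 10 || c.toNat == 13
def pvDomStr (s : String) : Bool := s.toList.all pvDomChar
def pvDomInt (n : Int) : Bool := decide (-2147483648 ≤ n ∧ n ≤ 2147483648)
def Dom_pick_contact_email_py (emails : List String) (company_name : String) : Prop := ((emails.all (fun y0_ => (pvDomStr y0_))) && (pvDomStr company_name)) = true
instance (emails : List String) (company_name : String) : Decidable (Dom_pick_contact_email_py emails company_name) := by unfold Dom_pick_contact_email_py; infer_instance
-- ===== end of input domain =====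

-- B replaces A's keyword-outer nested scan (early return) with one argmin pass over the
-- emails using a per-email priority score; same result, same cost (objective: alternative).

-- ===== PORT A =====
-- the fixed priority keyword list of the Python source
def pvKws : List String := ["recrutement", "rh", "hr", "contact", "emploi", "candidature"]

-- 'for kw in kws: for e in emails: if kw in e: return e' (inner loop = first match)
def pvLoopA (kws : List String) (emails : List String) : Option String :=
  match kws with
  | [] => none
  | kw :: rest =>
    match emails.find? (fun e => PySem.Str.isIn kw e) with
    | some e => some e
    | none => pvLoopA rest emails

def pick_contact_email_py (emails : List String) (_company_name : String) : Option String :=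
  match emails with
  | [] => none
  | e0 :: _ =>
    match pvLoopA pvKws emails with
    | some e => some e
    | none => some e0

-- ===== PORT B =====
-- score(e) = index of the first keyword contained in e, len(kws) if none (List.findIdx)
def pvScore (kws : List String) (e : String) : Nat :=
  kws.findIdx (fun kw => PySem.Str.isIn kw e)

-- 'for e in emails[1:]: s = score(e); if s < best_s: best, best_s = e, s'
def pvBestOf (f : String → Nat) (best : String) (bestS : Nat) (rest : List String) : String :=
  match rest with
  | [] => best
  | e :: rest' =>
    let s := f e
    if s < bestS then pvBestOf f e s rest' else pvBestOf f best bestS rest'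

def pick_contact_email_py_alt (emails : List String) (_company_name : String) : Option String :=
  match emails with
  | [] => none
  | e0 :: rest => some (pvBestOf (pvScore pvKws) e0 (pvScore pvKws e0) rest)

-- ===== PRECONDITION & SPEC =====
def Spec_pick_contact_email_py (emails : List String) (company_name : String) (out : Option String) : Prop := out = pick_contact_email_py_alt emails company_name
instance (emails : List String) (company_name : String) (out : Option String) : Decidable (Spec_pick_contact_email_py emails company_name out) := by unfold Spec_pick_contact_email_py; infer_instance

-- ===== CLAIM (what is proved, stated in full; the proofs are below) =====
def Claim_equal_pick_contact_email_py : Prop := ∀ (emails : List String) (company_name : String), Dom_pick_contact_email_py emails company_name → Spec_pick_contact_email_py emails company_name (pick_contact_email_py emails company_name)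

-- ===== LEMMAS AND PROOFS =====

-- with a current best score of 0 the fold never updates
theorem pvBestOf_zero (f : String → Nat) (best : String) (l : List String) :
    pvBestOf f best 0 l = best := by
  induction l with
  | nil => rfl
  | cons e l ih => simp [pvBestOf, ih]

-- once some element of l has score 0, the fold returns the first such element
theorem pvBestOf_find_zero (f : String → Nat) (p : String → Bool) (l : List String)
    (hp : ∀ x, f x = 0 ↔ p x = true) :
    ∀ (best : String) (s : Nat), 0 < s →
    ∀ y, l.find? p = some y → pvBestOf f best s l = y := by
  induction l with
  | nil => intro _ _ _ y h; simp [List.find?] at h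
  | cons e l ih =>
    intro best s hs y h
    by_cases he : f e = 0
    · rw [List.find?_cons_of_pos ((hp e).mp he)] at h
      cases h
      simp [pvBestOf, he, hs, pvBestOf_zero]
    · rw [List.find?_cons_of_neg (fun hc => he ((hp e).mpr hc))] at h
      by_cases hlt : f e < s
      · simpa [pvBestOf, hlt] using ih _ _ (Nat.pos_of_ne_zero he) y h
      · simpa [pvBestOf, hlt] using ih _ _ hs y h

-- shifting every score in sight by +1 does not change the chosen element
theorem pvBestOf_shift (f g : String → Nat) (l : List String) :
    ∀ (best : String) (s : Nat), (∀ x ∈ l, f x = g x + 1) →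
    pvBestOf f best (s + 1) l = pvBestOf g best s l := by
  induction l with
  | nil => intro _ _ _; rfl
  | cons e l ih =>
    intro best s hfg
    have he : f e = g e + 1 := hfg e (by simp)
    have hrest : ∀ x ∈ l, f x = g x + 1 := fun x hx => hfg x (by simp [hx])
    unfold pvBestOf
    simp only [he]
    by_cases hlt : g e < s
    · simp [Nat.add_lt_add_iff_right.mpr hlt, hlt, ih _ _ hrest]
    · simp [hlt, ih _ _ hrest]

-- score on a cons of the keyword list
theorem pvScore_cons (kw : String) (rest : List String) (e : String) :
    pvScore (kw :: rest) e =
      if PySem.Str.isIn kw e then 0 else pvScore rest e + 1 := by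
  simp [pvScore, List.findIdx_cons, Bool.cond_eq_ite]

-- main equivalence, generalised over the keyword list
theorem pvMain (kws : List String) (e0 : String) (rest : List String) :
    pvBestOf (pvScore kws) e0 (pvScore kws e0) rest =
      (match pvLoopA kws (e0 :: rest) with
       | some e => e
       | none => e0) := by
  induction kws generalizing e0 rest with
  | nil =>
    simp only [pvLoopA]
    have : pvScore ([] : List String) e0 = 0 := rfl
    rw [this, pvBestOf_zero]
  | cons kw kws' ih =>
    by_cases h0 : PySem.Str.isIn kw e0
    · -- the head email already matches kw: A returns e0, B keeps score 0
      have : (e0 :: rest).find? (fun e => PySem.Str.isIn kw e) = some e0 :=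
        List.find?_cons_of_pos (by simpa using h0)
      simp only [pvLoopA, this]
      rw [pvScore_cons, if_pos h0, pvBestOf_zero]
    · have hfind : (e0 :: rest).find? (fun e => PySem.Str.isIn kw e) =
          rest.find? (fun e => PySem.Str.isIn kw e) :=
        List.find?_cons_of_neg (by simpa using h0)
      rw [pvScore_cons, if_neg h0]
      cases hr : rest.find? (fun e => PySem.Str.isIn kw e) with
      | some y =>
        -- some later email matches kw: A returns the first such; B's fold hits score 0 there
        simp only [pvLoopA, hfind, hr]
        apply pvBestOf_find_zero _ (fun e => PySem.Str.isIn kw e) rest ?_ _ _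
          (Nat.succ_pos _) y hr
        intro x
        rw [pvScore_cons]
        by_cases hx : PySem.Str.isIn kw x
        · simp
        · simp
      | none =>
        -- no email matches kw: every score is shifted by 1, reduce to the tail keywords
        have hall : ∀ x ∈ rest, pvScore (kw :: kws') x = pvScore kws' x + 1 := by
          intro x hx
          have hnc : ¬ PySem.Str.isIn kw x = true := by
            intro hc
            exact absurd hc (by simpa using List.find?_eq_none.mp hr x hx)
          rw [pvScore_cons, if_neg hnc]
        simp only [pvLoopA, hfind, hr]
        rw [pvBestOf_shift _ _ _ _ _ hall, ih e0 rest]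

-- ===== VERDICT (by name: the statement is the Claim_ definition above) =====
theorem pick_contact_email_py_spec : Claim_equal_pick_contact_email_py := by
  intro emails company_name _
  unfold Spec_pick_contact_email_py pick_contact_email_py pick_contact_email_py_alt
  cases emails with
  | nil => rfl
  | cons e0 rest =>
    simp only
    rw [pvMain pvKws e0 rest]
    cases pvLoopA pvKws (e0 :: rest) <;> rfl
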